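-- pv_equiv track=rewrite | github.com/RoweKelvin/python-learning-resp | HTTP-speed-downloader/main.py | getChunkList
-- ===== SOURCE A (Python) =====
-- def getChunkList(concurrency, fileSize):
--     if fileSize <= 0:
--         return []
--     if concurrency <= 0:
--         concurrency = 1
--     baseChunkSize = fileSize // concurrency
--     remainder = fileSize % concurrency
--     chunks = []
--     start = 0
--     for i in range(concurrency):
--         chunkSize = baseChunkSize + (1 if i < remainder else 0)
--         if chunkSize == 0:
--             break
--         end = start + chunkSize - 1
--         if end > fileSize - 1:
--             end = fileSize - 1
--         chunks.append((start, end))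
--         start = end + 1
--         if start >= fileSize:
--             break
--     return chunks
-- ===== SOURCE B (Python) =====
-- def getChunkList(concurrency, fileSize):
--     if fileSize <= 0:
--         return []
--     if concurrency <= 0:
--         concurrency = 1
--     base, rem = divmod(fileSize, concurrency)
--     n = concurrency if base > 0 else rem
--     return [(i * base + min(i, rem), (i + 1) * base + min(i + 1, rem) - 1)
--             for i in range(n)]
-- ===== Notes on version B (the rewrite author's own statement) =====
-- stated objective: simpler
-- what changed: Replaces the start-accumulator loop with two breaks by a direct comprehension over the known number of nonempty chunks, computing each chunk's bounds in closed form (start_i = i*base + min(i, rem)).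
import Mathlib
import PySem

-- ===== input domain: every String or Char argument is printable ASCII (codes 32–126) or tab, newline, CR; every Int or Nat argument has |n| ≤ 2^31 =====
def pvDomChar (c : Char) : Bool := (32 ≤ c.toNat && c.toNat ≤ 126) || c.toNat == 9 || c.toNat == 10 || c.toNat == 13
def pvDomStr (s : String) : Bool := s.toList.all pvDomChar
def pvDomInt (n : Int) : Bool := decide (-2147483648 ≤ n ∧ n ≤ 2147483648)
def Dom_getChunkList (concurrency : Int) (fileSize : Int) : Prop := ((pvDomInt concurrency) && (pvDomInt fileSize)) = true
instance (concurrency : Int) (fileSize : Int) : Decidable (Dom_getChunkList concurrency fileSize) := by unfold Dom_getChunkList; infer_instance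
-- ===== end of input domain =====

-- B replaces A's start-accumulator loop with two breaks by a direct map over the
-- known number of nonempty chunks, each chunk's bounds computed in closed form.

-- ===== PORT A =====
-- the for-loop of A, with its two breaks, as recursion on the loop index i of
-- range(concurrency) (Python's range is lazy; the index recursion mirrors that)
def getChunkListLoop (base rem fs c i start : Int) : List (Int × Int) :=
  if _h : i < c then
    let chunkSize := base + (if i < rem then (1 : Int) else 0)
    if chunkSize = 0 then []
    else
      let e0 := start + chunkSize - 1
      let e := if e0 > fs - 1 then fs - 1 else e0
      if e + 1 ≥ fs then [(start, e)]
      else (start, e) :: getChunkListLoop base rem fs c (i + 1) (e + 1)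
  else []
termination_by (c - i).toNat
decreasing_by omega

def getChunkList (concurrency : Int) (fileSize : Int) : List (Int × Int) :=
  if fileSize ≤ 0 then []
  else
    let c := if concurrency ≤ 0 then 1 else concurrency
    let base := PySem.Int.floordiv fileSize c
    let rem := PySem.Int.mod fileSize c
    getChunkListLoop base rem fileSize c 0 0

-- ===== PORT B =====
def getChunkList_alt (concurrency : Int) (fileSize : Int) : List (Int × Int) :=
  if fileSize ≤ 0 then []
  else
    let c := if concurrency ≤ 0 then 1 else concurrency
    let base := PySem.Int.floordiv fileSize c
    let rem := PySem.Int.mod fileSize c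
    let n := if 0 < base then c else rem
    (PySem.List.pyRange 0 n 1).map (fun i =>
      (i * base + min i rem, (i + 1) * base + min (i + 1) rem - 1))

-- ===== PRECONDITION & SPEC =====
def Spec_getChunkList (concurrency : Int) (fileSize : Int) (out : List (Int × Int)) : Prop := out = getChunkList_alt concurrency fileSize
instance (concurrency : Int) (fileSize : Int) (out : List (Int × Int)) : Decidable (Spec_getChunkList concurrency fileSize out) := by unfold Spec_getChunkList; infer_instance

-- ===== CLAIM (what is proved, stated in full; the proofs are below) =====
def Claim_equal_getChunkList : Prop := ∀ (concurrency : Int) (fileSize : Int), Dom_getChunkList concurrency fileSize → Spec_getChunkList concurrency fileSize (getChunkList concurrency fileSize)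

-- ===== LEMMAS AND PROOFS =====

lemma pvRangeNil (a b : Int) (h : b ≤ a) : PySem.List.pyRange a b 1 = [] := by
  rw [PySem.List.pyRange_one]
  simp [Int.toNat_of_nonpos (by omega : b - a ≤ 0)]

lemma getChunkListLoop_eq (base rem fs c n : Int) (hb : 0 ≤ base) (_hr : 0 ≤ rem)
    (hrc : rem < c) (hfs : fs = base * c + rem)
    (hn : n = if 0 < base then c else rem) :
    ∀ i : Int, 0 ≤ i → i ≤ c →
      getChunkListLoop base rem fs c i (i * base + min i rem)
        = (PySem.List.pyRange i n 1).map (fun i =>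
            (i * base + min i rem, (i + 1) * base + min (i + 1) rem - 1)) := by
  intro i hi hic
  have hmeas : (c - i).toNat ≤ (c - i).toNat := le_refl _
  generalize hk : (c - i).toNat = k at hmeas
  clear hmeas
  induction k generalizing i with
  | zero =>
    have hci : c ≤ i := by omega
    rw [getChunkListLoop, pvRangeNil _ _ (by split at hn <;> omega)]
    simp [not_lt.mpr hci]
  | succ k ih =>
    have hlt : i < c := by omega
    rw [getChunkListLoop]
    rw [dif_pos hlt]
    simp only
    -- useful product facts
    have hmul1 : (i + 1) * base = i * base + base := by ring
    have hmulc : (i + 1) * base ≤ c * base := by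
      have := mul_le_mul_of_nonneg_right (show i + 1 ≤ c by omega) hb
      linarith
    have hfs' : fs = c * base + rem := by linarith [hfs, mul_comm base c]
    by_cases hz : base + (if i < rem then (1 : Int) else 0) = 0
    · -- chunkSize == 0: base = 0 and rem ≤ i, so n ≤ i and RHS is empty
      have hb0 : base = 0 ∧ rem ≤ i := by split at hz <;> omega
      rw [if_pos hz, pvRangeNil _ _ (by split at hn <;> omega)]
      rfl
    · rw [if_neg hz]
      have hcs : 0 < base + (if i < rem then (1 : Int) else 0) := by
        split at hz <;> split <;> omega
      -- the next start in closed form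
      have hstart' : i * base + min i rem + (base + (if i < rem then (1 : Int) else 0))
          = (i + 1) * base + min (i + 1) rem := by
        rw [hmul1]; split <;> omega
      -- next start ≤ fs, so the clamp never fires
      have hle : (i + 1) * base + min (i + 1) rem ≤ fs := by
        rw [hfs']
        have : min (i + 1) rem ≤ rem := min_le_right _ _
        linarith
      have hclamp : ¬ (i * base + min i rem + (base + (if i < rem then (1 : Int) else 0)) - 1 > fs - 1) := by
        omega
      rw [if_neg hclamp]
      -- i < n in this branch
      have hiltn : i < n := by
        rcases lt_or_ge 0 base with hbp | hbn
        · split at hn <;> omega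
        · have hb0 : base = 0 := by omega
          have : i < rem := by by_contra h; exact hz (by simp [hb0]; omega)
          split at hn <;> omega
      -- break condition ⟷ i + 1 ≥ n
      have hbrk : (i * base + min i rem + (base + (if i < rem then (1 : Int) else 0)) - 1 + 1 ≥ fs)
          ↔ i + 1 ≥ n := by
        rw [hstart']
        constructor
        · intro h
          by_contra hcon
          push_neg at hcon
          -- i + 1 < n
          rcases lt_or_ge 0 base with hbp | hbn
          · have hnc : n = c := by split at hn <;> omega
            have h1c : i + 1 < c := by omega
            have : (i + 1) * base + base ≤ c * base := by
              have := mul_le_mul_of_nonneg_right (show i + 1 + 1 ≤ c by omega) hb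
              nlinarith
            have : min (i + 1) rem ≤ rem := min_le_right _ _
            rw [hfs'] at h; omega
          · have hb0 : base = 0 := by omega
            have hnr : n = rem := by split at hn <;> omega
            rw [hfs', hb0] at h
            simp at h
            omega
        · intro h
          rw [hfs']
          rcases lt_or_ge 0 base with hbp | hbn
          · have hnc : n = c := by split at hn <;> omega
            have hi1c : i + 1 = c := by omega
            rw [hi1c]
            have : min c rem = rem := by omega
            omega
          · have hb0 : base = 0 := by omega
            have hnr : n = rem := by split at hn <;> omega
            rw [hb0]
            simp
            omega
      have hhead : i * base + min i rem + (base + (if i < rem then (1 : Int) else 0)) - 1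
          = (i + 1) * base + min (i + 1) rem - 1 := by omega
      by_cases hb2 : i * base + min i rem + (base + (if i < rem then (1 : Int) else 0)) - 1 + 1 ≥ fs
      · rw [if_pos hb2]
        have hend : n ≤ i + 1 := hbrk.mp hb2
        rw [PySem.List.pyRange_one_cons (by omega), pvRangeNil _ _ (by omega)]
        simp only [List.map_cons, List.map_nil]
        rw [hhead]
      · rw [if_neg hb2]
        have hnext : i * base + min i rem + (base + (if i < rem then (1 : Int) else 0)) - 1 + 1
            = (i + 1) * base + min (i + 1) rem := by omega
        rw [hnext]
        rw [ih (i + 1) (by omega) (by omega) (by omega)]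
        rw [PySem.List.pyRange_one_cons (by omega : i < n)]
        simp only [List.map_cons]
        rw [hhead]

-- ===== VERDICT (by name: the statement is the Claim_ definition above) =====
theorem getChunkList_spec : Claim_equal_getChunkList := by
  intro concurrency fileSize _hdom
  unfold Spec_getChunkList getChunkList getChunkList_alt
  by_cases hfs : fileSize ≤ 0
  · simp [hfs]
  · rw [if_neg hfs, if_neg hfs]
    push_neg at hfs
    set c := if concurrency ≤ 0 then 1 else concurrency with hc
    have hcpos : 0 < c := by rw [hc]; split <;> omega
    have hdiv : PySem.Int.floordiv fileSize c = fileSize / c :=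
      PySem.Int.floordiv_eq_ediv_of_pos hcpos
    have hmod : PySem.Int.mod fileSize c = fileSize % c :=
      PySem.Int.mod_eq_emod_of_pos hcpos
    simp only [hdiv, hmod]
    have hb : 0 ≤ fileSize / c := Int.ediv_nonneg (by omega) (by omega)
    have hr : 0 ≤ fileSize % c := Int.emod_nonneg _ (by omega)
    have hrc : fileSize % c < c := Int.emod_lt_of_pos _ hcpos
    have hfseq : fileSize = (fileSize / c) * c + fileSize % c := by
      rw [mul_comm]; exact (Int.ediv_add_emod fileSize c).symm
    have := getChunkListLoop_eq (fileSize / c) (fileSize % c) fileSize c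
      (if 0 < fileSize / c then c else fileSize % c) hb hr hrc hfseq rfl 0 le_rfl (by omega)
    simpa [min_eq_left hr, Int.zero_mul] using this
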